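-- pv_equiv track=rewrite | github.com/phatsanphonna/dsa-lab | lab07.py | isIntersectWithBigO2
-- ===== SOURCE A (Python) =====
-- def isIntersectWithBigO2(array1: set[int], array2: set[int], array3: set[int]):
--     '''Check that all arrays is intersect with O(n^2)'''
--
--     intersect = []
--
--     for a1 in array1:
--         for a2 in array2:
--             if a1 == a2:
--                 intersect.append(a1)
--
--     for data in intersect:
--         if data in array3:
--             return True
--
--     return False
-- ===== SOURCE B (Python) =====
-- def isIntersectWithBigO2(array1: set[int], array2: set[int], array3: set[int]):
--     '''Check that all arrays is intersect: one fused pass over array1'''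
--     for x in array1:
--         if x in array2 and x in array3:
--             return True
--     return False
-- ===== Notes on version B (the rewrite author's own statement) =====
-- stated objective: faster
-- what changed: Replaces A's nested-loop construction of an intermediate intersection list plus a second scan with a single fused pass over array1 that tests membership in array2 and array3 directly and returns at the first common element.
import Mathlib
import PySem

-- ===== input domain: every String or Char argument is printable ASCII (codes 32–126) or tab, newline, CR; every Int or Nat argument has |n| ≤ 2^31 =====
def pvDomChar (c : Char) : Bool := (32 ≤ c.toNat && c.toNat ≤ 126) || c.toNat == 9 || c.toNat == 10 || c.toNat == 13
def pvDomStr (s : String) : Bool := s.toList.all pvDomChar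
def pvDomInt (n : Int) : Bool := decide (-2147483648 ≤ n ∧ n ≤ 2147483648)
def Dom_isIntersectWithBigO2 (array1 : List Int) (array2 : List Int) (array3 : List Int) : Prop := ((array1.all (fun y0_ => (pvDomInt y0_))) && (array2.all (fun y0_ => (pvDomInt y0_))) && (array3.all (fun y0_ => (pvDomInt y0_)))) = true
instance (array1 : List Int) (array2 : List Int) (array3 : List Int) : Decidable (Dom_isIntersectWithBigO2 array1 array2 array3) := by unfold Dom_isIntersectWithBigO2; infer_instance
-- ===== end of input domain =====

-- B fuses A's nested-loop intersection build and the separate scan into one pass over array1 (return value only; A mutates no argument).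


-- ===== PORT A =====
-- second loop of A: scan `intersect`, return True at the first element found in array3
def pvScanA (intersect : List Int) (array3 : List Int) : Bool :=
  match intersect with
  | [] => false
  | d :: rest => if array3.contains d then true else pvScanA rest array3

def isIntersectWithBigO2 (array1 : List Int) (array2 : List Int) (array3 : List Int) : Bool :=
  let intersect :=
    array1.foldl (fun acc a1 =>
      array2.foldl (fun acc a2 => if a1 == a2 then acc ++ [a1] else acc) acc) []
  pvScanA intersect array3

-- ===== PORT B =====
def isIntersectWithBigO2_alt (array1 : List Int) (array2 : List Int) (array3 : List Int) : Bool :=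
  array1.any (fun x => array2.contains x && array3.contains x)

-- ===== PRECONDITION & SPEC =====
def Spec_isIntersectWithBigO2 (array1 : List Int) (array2 : List Int) (array3 : List Int) (out : Bool) : Prop := out = isIntersectWithBigO2_alt array1 array2 array3
instance (array1 : List Int) (array2 : List Int) (array3 : List Int) (out : Bool) : Decidable (Spec_isIntersectWithBigO2 array1 array2 array3 out) := by unfold Spec_isIntersectWithBigO2; infer_instance

-- ===== CLAIM (what is proved, stated in full; the proofs are below) =====
def Claim_equal_isIntersectWithBigO2 : Prop := ∀ (array1 : List Int) (array2 : List Int) (array3 : List Int), Dom_isIntersectWithBigO2 array1 array2 array3 → Spec_isIntersectWithBigO2 array1 array2 array3 (isIntersectWithBigO2 array1 array2 array3)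

-- ===== LEMMAS AND PROOFS =====

-- ===== VERDICT (by name: the statement is the Claim_ definition above) =====
-- membership in the inner-loop accumulator
theorem pv_mem_inner (a1 : Int) (l2 : List Int) (acc : List Int) (x : Int) :
    x ∈ l2.foldl (fun acc a2 => if a1 == a2 then acc ++ [a1] else acc) acc ↔
      x ∈ acc ∨ (x = a1 ∧ a1 ∈ l2) := by
  induction l2 generalizing acc with
  | nil => simp
  | cons h t ih =>
    rw [List.foldl_cons]
    by_cases he : a1 = h
    · subst he
      rw [if_pos (by simp), ih]
      simp [List.mem_append]
      tauto
    · rw [if_neg (by simp [he]), ih]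
      simp only [List.mem_cons]
      constructor
      · rintro (h1 | ⟨rfl, h2⟩)
        · exact Or.inl h1
        · exact Or.inr ⟨rfl, Or.inr h2⟩
      · rintro (h1 | ⟨rfl, (rfl | h2)⟩)
        · exact Or.inl h1
        · exact absurd rfl he
        · exact Or.inr ⟨rfl, h2⟩

-- membership in A's intermediate `intersect` list
theorem pv_mem_intersect (l1 l2 : List Int) (acc : List Int) (x : Int) :
    x ∈ l1.foldl (fun acc a1 =>
        l2.foldl (fun acc a2 => if a1 == a2 then acc ++ [a1] else acc) acc) acc ↔
      x ∈ acc ∨ (x ∈ l1 ∧ x ∈ l2) := by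
  induction l1 generalizing acc with
  | nil => simp
  | cons h t ih =>
    simp only [List.foldl_cons, ih, pv_mem_inner, List.mem_cons]
    constructor
    · rintro ((h1 | ⟨rfl, h2⟩) | ⟨h3, h4⟩)
      · exact Or.inl h1
      · exact Or.inr ⟨Or.inl rfl, h2⟩
      · exact Or.inr ⟨Or.inr h3, h4⟩
    · rintro (h1 | ⟨(rfl | h3), h4⟩)
      · exact Or.inl (Or.inl h1)
      · exact Or.inl (Or.inr ⟨rfl, h4⟩)
      · exact Or.inr ⟨h3, h4⟩

-- A's second loop is an existence test
theorem pv_scanA_any (l l3 : List Int) :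
    pvScanA l l3 = l.any (fun d => l3.contains d) := by
  induction l with
  | nil => rfl
  | cons h t ih =>
    rw [List.any_cons, ← ih]
    simp [pvScanA]

theorem isIntersectWithBigO2_spec : Claim_equal_isIntersectWithBigO2 := by
  intro a1 a2 a3 _
  unfold Spec_isIntersectWithBigO2 isIntersectWithBigO2 isIntersectWithBigO2_alt
  rw [pv_scanA_any, Bool.eq_iff_iff]
  simp only [List.any_eq_true, List.contains_eq_mem, Bool.and_eq_true, decide_eq_true_eq,
    pv_mem_intersect, List.not_mem_nil, false_or]
  constructor
  · rintro ⟨x, ⟨h1, h2⟩, h3⟩; exact ⟨x, h1, h2, h3⟩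
  · rintro ⟨x, h1, h2, h3⟩; exact ⟨x, ⟨h1, h2⟩, h3⟩
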